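-- pv_equiv track=rewrite | github.com/gynsora/TLT_pygame | TLT/utilities.py | normal_line_form
-- ===== SOURCE A (Python) =====
-- def normal_line_form(target_x,target_y, range_of_spell,player_x,player_y):
--     coordinates = []
--     #south
--     if target_x == player_x and target_y > player_y:
--         for i in range(target_y , target_y + range_of_spell):
--             coordinates.append(tuple((target_x, i)))
--     #north
--     if target_x == player_x and target_y < player_y:
--         for i in range(target_y , target_y - range_of_spell,-1):
--             coordinates.append(tuple((target_x, i)))
--     #east
--     if target_y == player_y and target_x > player_x:
--         for i in range(target_x , target_x + range_of_spell):
--             coordinates.append(tuple((i, target_y)))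
--     #west
--     if target_y == player_y and target_x < player_x:
--         for i in range(target_x , target_x - range_of_spell,-1):
--             coordinates.append(tuple((i, target_y)))
--
--     return coordinates
-- ===== SOURCE B (Python) =====
-- def normal_line_form(target_x, target_y, range_of_spell, player_x, player_y):
--     # direction by sign arithmetic (no four-way branch), then build the line
--     # BACK-TO-FRONT: walk from the far endpoint toward the target, then reverse.
--     dx = ((target_x > player_x) - (target_x < player_x)) if target_y == player_y else 0
--     dy = ((target_y > player_y) - (target_y < player_y)) if target_x == player_x else 0
--     if dx == 0 and dy == 0:
--         return []
--     pts = []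
--     k = range_of_spell
--     while k > 0:
--         k -= 1
--         pts.append((target_x + dx * k, target_y + dy * k))
--     pts.reverse()
--     return pts
-- ===== Notes on version B (the rewrite author's own statement) =====
-- stated objective: alternative
-- what changed: Derives the unit step by sign arithmetic instead of a four-way branch, then builds the line back-to-front by a countdown walk from the far endpoint and reverses it, replacing A's four conditional forward append-loops.
import Mathlib
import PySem

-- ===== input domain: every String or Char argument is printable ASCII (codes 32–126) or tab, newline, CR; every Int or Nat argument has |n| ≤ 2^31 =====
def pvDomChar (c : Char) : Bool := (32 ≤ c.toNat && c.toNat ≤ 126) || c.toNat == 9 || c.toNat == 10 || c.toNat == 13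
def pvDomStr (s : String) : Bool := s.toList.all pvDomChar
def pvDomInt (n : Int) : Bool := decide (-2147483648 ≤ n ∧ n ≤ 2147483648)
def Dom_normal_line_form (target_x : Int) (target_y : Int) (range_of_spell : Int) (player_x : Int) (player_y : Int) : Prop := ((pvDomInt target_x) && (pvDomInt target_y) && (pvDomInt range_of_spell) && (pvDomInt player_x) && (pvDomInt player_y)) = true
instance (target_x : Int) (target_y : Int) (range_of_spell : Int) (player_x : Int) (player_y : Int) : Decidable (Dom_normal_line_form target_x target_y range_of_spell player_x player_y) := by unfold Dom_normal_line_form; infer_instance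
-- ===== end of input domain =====

-- B change: derives the unit step by sign arithmetic, then builds the line back-to-front
-- by a countdown walk from the far endpoint and reverses it (alternative decomposition).
-- ===== PORT A =====
def normal_line_form (target_x : Int) (target_y : Int) (range_of_spell : Int) (player_x : Int) (player_y : Int) : List (Int × Int) :=
  let coordinates : List (Int × Int) := []
  -- south
  let coordinates :=
    if target_x = player_x ∧ target_y > player_y then
      (PySem.List.pyRange target_y (target_y + range_of_spell) 1).foldl
        (fun acc i => acc ++ [(target_x, i)]) coordinates
    else coordinates
  -- north
  let coordinates :=
    if target_x = player_x ∧ target_y < player_y then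
      (PySem.List.pyRange target_y (target_y - range_of_spell) (-1)).foldl
        (fun acc i => acc ++ [(target_x, i)]) coordinates
    else coordinates
  -- east
  let coordinates :=
    if target_y = player_y ∧ target_x > player_x then
      (PySem.List.pyRange target_x (target_x + range_of_spell) 1).foldl
        (fun acc i => acc ++ [(i, target_y)]) coordinates
    else coordinates
  -- west
  let coordinates :=
    if target_y = player_y ∧ target_x < player_x then
      (PySem.List.pyRange target_x (target_x - range_of_spell) (-1)).foldl
        (fun acc i => acc ++ [(i, target_y)]) coordinates
    else coordinates
  coordinates

-- ===== PORT B =====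
-- the Python while-loop 'while k > 0: k -= 1; pts.append(...)': fuel = k.toNat
def pvWalk (tx ty dx dy : Int) : Nat → Int → List (Int × Int) → List (Int × Int)
  | 0, _, acc => acc
  | f + 1, k, acc => pvWalk tx ty dx dy f (k - 1) (acc ++ [(tx + dx * (k - 1), ty + dy * (k - 1))])

def normal_line_form_alt (target_x : Int) (target_y : Int) (range_of_spell : Int) (player_x : Int) (player_y : Int) : List (Int × Int) :=
  let dx : Int := if target_y = player_y then
      ((if target_x > player_x then (1 : Int) else 0) - (if target_x < player_x then (1 : Int) else 0)) else 0
  let dy : Int := if target_x = player_x then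
      ((if target_y > player_y then (1 : Int) else 0) - (if target_y < player_y then (1 : Int) else 0)) else 0
  if dx = 0 ∧ dy = 0 then []
  else (pvWalk target_x target_y dx dy range_of_spell.toNat range_of_spell []).reverse

-- ===== PRECONDITION & SPEC =====
def Spec_normal_line_form (target_x : Int) (target_y : Int) (range_of_spell : Int) (player_x : Int) (player_y : Int) (out : List (Int × Int)) : Prop := out = normal_line_form_alt target_x target_y range_of_spell player_x player_y
instance (target_x : Int) (target_y : Int) (range_of_spell : Int) (player_x : Int) (player_y : Int) (out : List (Int × Int)) : Decidable (Spec_normal_line_form target_x target_y range_of_spell player_x player_y out) := by unfold Spec_normal_line_form; infer_instance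

-- ===== CLAIM =====
def Claim_equal_normal_line_form : Prop := ∀ (target_x : Int) (target_y : Int) (range_of_spell : Int) (player_x : Int) (player_y : Int), Dom_normal_line_form target_x target_y range_of_spell player_x player_y → Spec_normal_line_form target_x target_y range_of_spell player_x player_y (normal_line_form target_x target_y range_of_spell player_x player_y)

-- ===== LEMMAS AND PROOFS =====
theorem pv_foldl_append_map {α β : Type} (g : α → β) (l : List α) (acc : List β) :
    l.foldl (fun acc i => acc ++ [g i]) acc = acc ++ l.map g := by
  induction l generalizing acc with
  | nil => simp
  | cons x xs ih => simp [List.foldl_cons, ih]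

theorem pvWalk_eq (tx ty dx dy : Int) (f : Nat) (k : Int) (acc : List (Int × Int)) :
    pvWalk tx ty dx dy f k acc
      = acc ++ (List.range f).map (fun (j : Nat) => (tx + dx * (k - 1 - (j : Int)), ty + dy * (k - 1 - (j : Int)))) := by
  induction f generalizing k acc with
  | zero => simp [pvWalk]
  | succ f ih =>
      rw [pvWalk, ih]
      simp [List.range_succ_eq_map]
      intro a _
      omega

theorem pvWalk_reverse (tx ty dx dy : Int) (f : Nat) (k : Int) :
    (pvWalk tx ty dx dy f k []).reverse
      = (List.range f).map (fun (j : Nat) => (tx + dx * (k - f + (j : Int)), ty + dy * (k - f + (j : Int)))) := by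
  rw [pvWalk_eq]
  apply List.ext_getElem
  · simp
  · intro i h1 h2
    have hi : i < f := by simpa using h2
    simp only [List.nil_append, List.getElem_reverse, List.length_map, List.length_range,
      List.getElem_map, List.getElem_range]
    rw [show ((f - 1 - i : Nat) : Int) = (f : Int) - 1 - i by omega]
    simp only [Prod.mk.injEq]
    constructor <;> ring

theorem normal_line_form_spec : Claim_equal_normal_line_form := by
  intro tx ty r px py _
  unfold Spec_normal_line_form normal_line_form normal_line_form_alt
  by_cases h1 : tx = px ∧ ty > py
  · simp only [if_pos h1, if_neg (show ¬(tx = px ∧ ty < py) by omega),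
      if_neg (show ¬(ty = py ∧ tx > px) by omega),
      if_neg (show ¬(ty = py ∧ tx < px) by omega),
      if_neg (show ¬ty = py by omega), if_pos h1.1, if_pos h1.2,
      if_neg (show ¬ty < py by omega)]
    rw [if_neg (by norm_num), pvWalk_reverse, pv_foldl_append_map,
      PySem.List.pyRange_one, show ty + r - ty = r by ring]
    by_cases hr : r ≤ 0
    · rw [show r.toNat = 0 by omega]; simp
    · rw [Int.toNat_of_nonneg (by omega)]
      simp only [List.nil_append, List.map_map]
      apply List.map_congr_left; intro j _
      simp only [Function.comp_apply, Prod.mk.injEq]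
      constructor <;> ring
  by_cases h2 : tx = px ∧ ty < py
  · simp only [if_neg h1, if_pos h2,
      if_neg (show ¬(ty = py ∧ tx > px) by omega),
      if_neg (show ¬(ty = py ∧ tx < px) by omega),
      if_neg (show ¬ty = py by omega), if_pos h2.1, if_pos h2.2,
      if_neg (show ¬ty > py by omega)]
    rw [if_neg (by norm_num), pvWalk_reverse, pv_foldl_append_map,
      PySem.List.pyRange_neg_one, show ty - (ty - r) = r by ring]
    by_cases hr : r ≤ 0
    · rw [show r.toNat = 0 by omega]; simp
    · rw [Int.toNat_of_nonneg (by omega)]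
      simp only [List.nil_append, List.map_map]
      apply List.map_congr_left; intro j _
      simp only [Function.comp_apply, Prod.mk.injEq]
      constructor <;> ring
  by_cases h3 : ty = py ∧ tx > px
  · simp only [if_neg h1, if_neg h2, if_pos h3,
      if_neg (show ¬(ty = py ∧ tx < px) by omega),
      if_neg (show ¬tx = px by omega), if_pos h3.1, if_pos h3.2,
      if_neg (show ¬tx < px by omega)]
    rw [if_neg (by norm_num), pvWalk_reverse, pv_foldl_append_map,
      PySem.List.pyRange_one, show tx + r - tx = r by ring]
    by_cases hr : r ≤ 0
    · rw [show r.toNat = 0 by omega]; simp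
    · rw [Int.toNat_of_nonneg (by omega)]
      simp only [List.nil_append, List.map_map]
      apply List.map_congr_left; intro j _
      simp only [Function.comp_apply, Prod.mk.injEq]
      constructor <;> ring
  by_cases h4 : ty = py ∧ tx < px
  · simp only [if_neg h1, if_neg h2, if_neg h3, if_pos h4,
      if_neg (show ¬tx = px by omega), if_pos h4.1, if_pos h4.2,
      if_neg (show ¬tx > px by omega)]
    rw [if_neg (by norm_num), pvWalk_reverse, pv_foldl_append_map,
      PySem.List.pyRange_neg_one, show tx - (tx - r) = r by ring]
    by_cases hr : r ≤ 0
    · rw [show r.toNat = 0 by omega]; simp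
    · rw [Int.toNat_of_nonneg (by omega)]
      simp only [List.nil_append, List.map_map]
      apply List.map_congr_left; intro j _
      simp only [Function.comp_apply, Prod.mk.injEq]
      constructor <;> ring
  · -- no direction selected: A returns []; B's dx = dy = 0
    simp only [if_neg h1, if_neg h2, if_neg h3, if_neg h4]
    by_cases hx : tx = px <;> by_cases hy : ty = py <;>
      simp_all <;> omega

-- ===== VERDICT =====
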